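-- pv_equiv track=rewrite | github.com/Blackcoffee111/extrator-provas-portugues | src/exames_pipeline/module_cotacoes.py | _fix_collapsed_group_format
-- ===== SOURCE A (Python) =====
-- def _fix_collapsed_group_format(estrutura: dict[str, list[str]]) -> dict[str, list[str]]:
--     """Corrige o formato onde o modelo colapsa todos os itens de um grupo num só pai."""
--     new_estrutura: dict[str, list[str]] = {}
--
--     for key, children in estrutura.items():
--         if key in children:
--             parents_of: dict[str, list[str]] = {}
--             leaves: list[str] = []
--             for child in children:
--                 if "." in child:
--                     parent = child.rsplit(".", 1)[0]
--                     parents_of.setdefault(parent, []).append(child)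
--                 else:
--                     leaves.append(child)
--
--             for leaf in leaves:
--                 if leaf in parents_of:
--                     new_estrutura[leaf] = parents_of[leaf]
--                 else:
--                     new_estrutura[leaf] = []
--         else:
--             new_estrutura[key] = children
--
--     return new_estrutura
-- ===== SOURCE B (Python) =====
-- def _fix_collapsed_group_format(estrutura: dict[str, list[str]]) -> dict[str, list[str]]:
--     """Corrige o formato onde o modelo colapsa todos os itens de um grupo num so pai."""
--     new_estrutura: dict[str, list[str]] = {}
--     for key, children in estrutura.items():
--         if key in children:
--             for leaf in (c for c in children if "." not in c):
--                 new_estrutura[leaf] = [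
--                     c for c in children if "." in c and c.rsplit(".", 1)[0] == leaf
--                 ]
--         else:
--             new_estrutura[key] = children
--     return new_estrutura
-- ===== Notes on version B (the rewrite author's own statement) =====
-- stated objective: simpler
-- what changed: Drops A's intermediate parents_of index and leaves accumulator: for each collapsed key B iterates the dot-free children directly and computes each leaf's group by a comprehension scanning children, instead of building and then looking up a prefix-keyed dict.
import Mathlib
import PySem

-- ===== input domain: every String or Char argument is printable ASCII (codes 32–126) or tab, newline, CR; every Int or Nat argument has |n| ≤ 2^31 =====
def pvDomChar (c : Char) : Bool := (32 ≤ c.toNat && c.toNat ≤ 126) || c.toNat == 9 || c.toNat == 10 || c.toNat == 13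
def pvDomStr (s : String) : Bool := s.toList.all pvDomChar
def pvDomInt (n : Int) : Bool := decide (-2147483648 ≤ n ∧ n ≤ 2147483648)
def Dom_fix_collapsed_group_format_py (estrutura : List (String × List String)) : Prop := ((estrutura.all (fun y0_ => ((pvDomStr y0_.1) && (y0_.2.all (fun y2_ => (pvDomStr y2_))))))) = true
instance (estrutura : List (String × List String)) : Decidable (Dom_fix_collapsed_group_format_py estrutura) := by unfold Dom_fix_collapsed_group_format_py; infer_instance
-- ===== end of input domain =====

-- B drops A's intermediate parents_of index: each leaf's group is computed by a direct
-- comprehension scan over children (objective: simpler; same results, no speed claim).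

-- shared primitive: s.rsplit(".", 1)[0] — exact whenever '.' occurs in s
-- (both ports only call it under the guard '"." in child')
def pvParent (s : String) : String :=
  String.ofList (((s.toList.reverse.dropWhile (· ≠ '.')).drop 1).reverse)

-- ===== PORT A =====
def fix_collapsed_group_format_py (estrutura : List (String × List String)) : List (String × List String) :=
  (estrutura.foldl (fun (new : PySem.Dict String (List String)) kv =>
      if kv.2.contains kv.1 then
        let st := kv.2.foldl
          (fun (st : PySem.Dict String (List String) × List String) child =>
            if PySem.Str.isIn "." child then
              (st.1.modify (pvParent child) [] (· ++ [child]), st.2)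
            else
              (st.1, st.2 ++ [child]))
          (PySem.Dict.empty, [])
        st.2.foldl (fun new leaf =>
          match st.1.get? leaf with
          | some v => new.insert leaf v
          | none => new.insert leaf []) new
      else
        new.insert kv.1 kv.2)
    PySem.Dict.empty).items

-- ===== PORT B =====
def fix_collapsed_group_format_py_alt (estrutura : List (String × List String)) : List (String × List String) :=
  (estrutura.foldl (fun (new : PySem.Dict String (List String)) kv =>
      if kv.2.contains kv.1 then
        (kv.2.filter (fun c => !(PySem.Str.isIn "." c))).foldl
          (fun new leaf =>
            new.insert leaf (kv.2.filter (fun c => PySem.Str.isIn "." c && pvParent c == leaf)))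
          new
      else
        new.insert kv.1 kv.2)
    PySem.Dict.empty).items

-- ===== PRECONDITION & SPEC =====
def Spec_fix_collapsed_group_format_py (estrutura : List (String × List String)) (out : List (String × List String)) : Prop := out = fix_collapsed_group_format_py_alt estrutura
instance (estrutura : List (String × List String)) (out : List (String × List String)) : Decidable (Spec_fix_collapsed_group_format_py estrutura out) := by unfold Spec_fix_collapsed_group_format_py; infer_instance

-- ===== CLAIM (what is proved, stated in full; the proofs are below) =====
def Claim_equal_fix_collapsed_group_format_py : Prop := ∀ (estrutura : List (String × List String)), Dom_fix_collapsed_group_format_py estrutura → Spec_fix_collapsed_group_format_py estrutura (fix_collapsed_group_format_py estrutura)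

-- ===== LEMMAS AND PROOFS =====

-- A's single grouping pass, split into its two components
lemma inner_fold_eq (cs : List String) (d : PySem.Dict String (List String)) (ls : List String) :
    cs.foldl
      (fun (st : PySem.Dict String (List String) × List String) child =>
        if PySem.Str.isIn "." child then
          (st.1.modify (pvParent child) [] (· ++ [child]), st.2)
        else
          (st.1, st.2 ++ [child]))
      (d, ls)
    = ((cs.filter (fun c => PySem.Str.isIn "." c)).foldl
         (fun d c => d.modify (pvParent c) [] (· ++ [c])) d,
       ls ++ cs.filter (fun c => !(PySem.Str.isIn "." c))) := by
  induction cs generalizing d ls with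
  | nil => simp
  | cons c cs ih =>
    rw [List.foldl_cons]
    by_cases h : PySem.Str.isIn "." c = true
    · rw [if_pos h, ih]
      simp only [List.filter_cons, h, Bool.not_true, if_true, Bool.false_eq_true, if_false,
        List.foldl_cons]
    · rw [if_neg h, ih]
      simp only [Bool.not_eq_true] at h
      simp only [List.filter_cons, h, Bool.not_false, Bool.false_eq_true, if_false, if_true,
        List.append_assoc, List.singleton_append]

-- looking the index up at a leaf IS B's comprehension over children
lemma parents_of_getD (cs : List String) (x : String) :
    ((cs.filter (fun c => PySem.Str.isIn "." c)).foldl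
       (fun (d : PySem.Dict String (List String)) c => d.modify (pvParent c) [] (· ++ [c]))
       PySem.Dict.empty).getD x []
    = cs.filter (fun c => PySem.Str.isIn "." c && pvParent c == x) := by
  have h := PySem.Dict.getD_foldl_modify_append
      (l := (cs.filter (fun c => PySem.Str.isIn "." c)).map (fun c => (pvParent c, c)))
      (d := (PySem.Dict.empty : PySem.Dict String (List String))) (c := x)
  rw [List.foldl_map] at h
  simp only [h, PySem.Dict.getD_empty, List.nil_append, List.filter_map, List.map_map,
    Function.comp_def, List.filter_filter, List.map_id']
  exact List.filter_congr (fun a _ => Bool.and_comm _ _)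

-- A's match on get? is an insert of getD
lemma match_insert (d new : PySem.Dict String (List String)) (leaf : String) :
    (match d.get? leaf with
     | some v => new.insert leaf v
     | none => new.insert leaf []) = new.insert leaf (d.getD leaf []) := by
  cases h : d.get? leaf with
  | some v => rw [PySem.Dict.getD_eq_get?_getD, h]; rfl
  | none => rw [PySem.Dict.getD_eq_get?_getD, h]; rfl

-- the two per-entry bodies agree
lemma step_eq (new : PySem.Dict String (List String)) (kv : String × List String) :
    (if kv.2.contains kv.1 then
       let st := kv.2.foldl
         (fun (st : PySem.Dict String (List String) × List String) child =>
           if PySem.Str.isIn "." child then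
             (st.1.modify (pvParent child) [] (· ++ [child]), st.2)
           else
             (st.1, st.2 ++ [child]))
         (PySem.Dict.empty, [])
       st.2.foldl (fun new leaf =>
         match st.1.get? leaf with
         | some v => new.insert leaf v
         | none => new.insert leaf []) new
     else new.insert kv.1 kv.2)
    = (if kv.2.contains kv.1 then
         (kv.2.filter (fun c => !(PySem.Str.isIn "." c))).foldl
           (fun new leaf =>
             new.insert leaf (kv.2.filter (fun c => PySem.Str.isIn "." c && pvParent c == leaf)))
           new
       else new.insert kv.1 kv.2) := by
  by_cases h : kv.2.contains kv.1 = true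
  · rw [if_pos h, if_pos h]
    simp only [inner_fold_eq, List.nil_append]
    apply PySem.List.foldl_congr_mem
    intro acc leaf _
    rw [match_insert, parents_of_getD]
  · rw [if_neg h, if_neg h]

theorem ports_agree (estrutura : List (String × List String)) :
    fix_collapsed_group_format_py estrutura = fix_collapsed_group_format_py_alt estrutura := by
  unfold fix_collapsed_group_format_py fix_collapsed_group_format_py_alt
  congr 1
  apply PySem.List.foldl_congr_mem
  intro acc kv _
  exact step_eq acc kv

-- ===== VERDICT (by name: the statement is the Claim_ definition above) =====
theorem fix_collapsed_group_format_py_spec : Claim_equal_fix_collapsed_group_format_py := by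
  intro estrutura _
  unfold Spec_fix_collapsed_group_format_py
  exact ports_agree estrutura
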